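-- pv_equiv track=rewrite | github.com/daxa-ai/pebblo | pebblo/entity_classifier/utils/result_validation.py | generate_permutations
-- ===== SOURCE A (Python) =====
-- from itertools import combinations
--
-- def generate_permutations(phrase):
--     """
--     Generate subsequences that preserve the word order from a given phrase.
--
--     Args:
--     - phrase (str): The input phrase to generate subsequences from.
--
--     Returns:
--     - list: List of subsequences in descending order of length.
--     """
--     words = phrase.split()
--     subsequences = [
--         " ".join(combo)
--         for length in range(1, len(words) + 1)
--         for combo in combinations(words, length)
--     ]
--     subsequences.sort(key=len, reverse=True)
--     return subsequences
-- ===== SOURCE B (Python) =====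
-- def _combos(words, k):
--     """All k-element subsequences of words, in index-lexicographic order."""
--     if k == 0:
--         return [[]]
--     if not words:
--         return []
--     head, rest = words[0], words[1:]
--     return [[head] + c for c in _combos(rest, k - 1)] + _combos(rest, k)
--
--
-- def generate_permutations(phrase):
--     """
--     Generate subsequences that preserve the word order from a given phrase,
--     in descending order of character length (stable within equal lengths).
--     """
--     words = phrase.split()
--     buckets = {}
--     for k in range(1, len(words) + 1):
--         for combo in _combos(words, k):
--             s = " ".join(combo)
--             buckets[len(s)] = buckets.get(len(s), []) + [s]
--     out = []
--     for key in sorted(buckets, reverse=True):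
--         out.extend(buckets[key])
--     return out
-- ===== Notes on version B (the rewrite author's own statement) =====
-- stated objective: alternative
-- what changed: Replaces itertools.combinations with a hand-written recursive subsequence enumerator and replaces the final stable sort(key=len, reverse=True) with length-keyed buckets filled during generation and concatenated over descending sorted keys.
import Mathlib
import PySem

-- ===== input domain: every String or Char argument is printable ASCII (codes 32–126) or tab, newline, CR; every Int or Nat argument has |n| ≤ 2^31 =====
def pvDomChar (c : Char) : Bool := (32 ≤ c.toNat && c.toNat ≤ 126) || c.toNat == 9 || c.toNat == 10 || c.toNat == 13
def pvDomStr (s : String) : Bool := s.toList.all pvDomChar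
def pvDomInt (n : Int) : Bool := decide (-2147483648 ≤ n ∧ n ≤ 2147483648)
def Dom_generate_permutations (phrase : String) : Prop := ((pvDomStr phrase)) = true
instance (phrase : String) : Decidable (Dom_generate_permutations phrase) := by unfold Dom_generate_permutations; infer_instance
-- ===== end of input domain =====

-- B replaces itertools.combinations by a hand-written recursive enumerator and the final
-- stable sort(key=len, reverse=True) by length-keyed buckets concatenated over descending
-- sorted keys — an alternative decomposition, equal output everywhere.

-- ===== PORT A =====
def generate_permutations (phrase : String) : List String :=
  let words := PySem.Str.split₀ phrase
  let subsequences :=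
    (PySem.List.pyRange 1 ((words.length : Int) + 1) 1).flatMap
      (fun length => (PySem.List.combinations words length.toNat).map
        (fun combo => PySem.Str.join " " combo))
  PySem.List.sorted subsequences (fun s => PySem.Str.len s) true

-- ===== PORT B =====
-- B-side helper: the recursive `_combos` of Source B, transliterated.
def pvCombos (words : List String) (k : Nat) : List (List String) :=
  match k, words with
  | 0, _ => [[]]
  | _ + 1, [] => []
  | k + 1, head :: rest =>
      (pvCombos rest k).map (fun c => head :: c) ++ pvCombos rest (k + 1)

def generate_permutations_alt (phrase : String) : List String :=
  let words := PySem.Str.split₀ phrase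
  let buckets :=
    (PySem.List.pyRange 1 ((words.length : Int) + 1) 1).foldl
      (fun d k =>
        (pvCombos words k.toNat).foldl
          (fun d combo =>
            let s := PySem.Str.join " " combo
            d.modify (PySem.Str.len s) [] (fun b => b ++ [s]))
          d)
      PySem.Dict.empty
  (PySem.List.sorted buckets.keys (fun k => k) true).foldl
    (fun out key => out ++ buckets.getD key []) []

-- ===== PRECONDITION & SPEC =====
def Spec_generate_permutations (phrase : String) (out : List String) : Prop := out = generate_permutations_alt phrase
instance (phrase : String) (out : List String) : Decidable (Spec_generate_permutations phrase out) := by unfold Spec_generate_permutations; infer_instance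

-- ===== CLAIM (what is proved, stated in full; the proofs are below) =====
def Claim_equal_generate_permutations : Prop := ∀ (phrase : String), Dom_generate_permutations phrase → Spec_generate_permutations phrase (generate_permutations phrase)

-- ===== LEMMAS AND PROOFS =====

-- Source B's recursive enumerator yields exactly itertools.combinations' order.
theorem pvCombos_eq (words : List String) (k : Nat) :
    pvCombos words k = PySem.List.combinations words k := by
  induction words generalizing k with
  | nil => cases k with
    | zero => simp [pvCombos, PySem.List.combinations_zero]
    | succ k => simp [pvCombos, PySem.List.combinations_nil_succ]
  | cons h t ih => cases k with
    | zero => simp [pvCombos, PySem.List.combinations_zero]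
    | succ k => simp [pvCombos, PySem.List.combinations_cons_succ, ih]

theorem pvFoldl_flatMap {α β : Type} (g : α → List β) (f : γ → β → γ) (l : List α) (b : γ) :
    (l.flatMap g).foldl f b = l.foldl (fun b x => (g x).foldl f b) b := by
  induction l generalizing b with
  | nil => rfl
  | cons x t ih => simp [List.flatMap_cons, List.foldl_append, ih]

theorem pvInsertBy_append_not_before {α : Type} (before : α → α → Bool) (x : α)
    (l r : List α) (h : ∀ y ∈ l, before x y = false) :
    PySem.List.insertBy before x (l ++ r) = l ++ PySem.List.insertBy before x r := by
  induction l with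
  | nil => rfl
  | cons y t ih =>
      have hy : before x y = false := h y (by simp)
      rw [List.cons_append]
      have hstep : PySem.List.insertBy before x (y :: (t ++ r))
          = y :: PySem.List.insertBy before x (t ++ r) := by
        simp [PySem.List.insertBy, hy]
      rw [hstep, ih (fun z hz => h z (by simp [hz]))]
      rfl

theorem pvInsertBy_all_before {α : Type} (before : α → α → Bool) (x : α)
    (l : List α) (h : ∀ y ∈ l, before x y = true) :
    PySem.List.insertBy before x l = x :: l := by
  cases l with
  | nil => rfl
  | cons y t => simp [PySem.List.insertBy, h y (by simp)]

theorem pvFlatMap_congr {α β : Type} (K : List α) (F G : α → List β)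
    (h : ∀ c ∈ K, F c = G c) : K.flatMap F = K.flatMap G := by
  induction K with
  | nil => rfl
  | cons c t ih => simp [List.flatMap_cons, h c (by simp), ih (fun z hz => h z (by simp [hz]))]

-- Insert x into a concatenation of strictly-descending key buckets: x lands at the
-- end of its own bucket (key x ∈ K).
theorem pvInsert_flatMap_mem {α : Type} (key : α → Int) (x : α) (K : List Int)
    (F : Int → List α) (hdec : K.Pairwise (· > ·))
    (hF : ∀ c, ∀ y ∈ F c, key y = c) (hk : key x ∈ K) :
    PySem.List.insertBy (fun a b => decide (key b < key a)) x (K.flatMap F) =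
      K.flatMap (fun c => F c ++ if key x == c then [x] else []) := by
  induction K with
  | nil => simp at hk
  | cons c t ih =>
      rcases List.pairwise_cons.mp hdec with ⟨hgt, ht⟩
      by_cases hc : key x = c
      · have h1 : ∀ y ∈ F c, (fun a b => decide (key b < key a)) x y = false := by
          intro y hy; simp [hF c y hy, hc]
        have h2 : ∀ y ∈ t.flatMap F, (fun a b => decide (key b < key a)) x y = true := by
          intro y hy
          rcases List.mem_flatMap.mp hy with ⟨c', hc', hyc'⟩
          simp [hF c' y hyc', hc]; exact hgt c' hc'
        rw [List.flatMap_cons, pvInsertBy_append_not_before _ _ _ _ h1,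
          pvInsertBy_all_before _ _ _ h2, List.flatMap_cons]
        have h3 : t.flatMap (fun c' => F c' ++ if key x == c' then [x] else []) =
            t.flatMap F := by
          apply pvFlatMap_congr; intro c' hc'
          have : key x ≠ c' := by have := hgt c' hc'; omega
          simp [this]
        rw [h3]; simp [hc]
      · have hkt : key x ∈ t := by
          rcases List.mem_cons.mp hk with h | h
          · exact absurd h hc
          · exact h
        have hlt : key x < c := hgt _ hkt
        have h1 : ∀ y ∈ F c, (fun a b => decide (key b < key a)) x y = false := by
          intro y hy; simp [hF c y hy]; omega
        rw [List.flatMap_cons, pvInsertBy_append_not_before _ _ _ _ h1, ih ht hkt,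
          List.flatMap_cons]
        have : key x ≠ c := hc
        simp [this]

-- Insert x whose key is new: the key slots into the descending key list, with [x] as
-- its (previously empty) bucket.
theorem pvInsert_flatMap_new {α : Type} (key : α → Int) (x : α) (K : List Int)
    (F : Int → List α) (hdec : K.Pairwise (· > ·))
    (hF : ∀ c, ∀ y ∈ F c, key y = c) (hk : key x ∉ K) (hFx : F (key x) = []) :
    PySem.List.insertBy (fun a b => decide (key b < key a)) x (K.flatMap F) =
      (PySem.List.insertBy (fun a b => decide ((b : Int) < a)) (key x) K).flatMap
        (fun c => F c ++ if key x == c then [x] else []) := by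
  induction K with
  | nil => simp [PySem.List.insertBy, hFx]
  | cons c t ih =>
      rcases List.pairwise_cons.mp hdec with ⟨hgt, ht⟩
      have hne : key x ≠ c := by intro h; exact hk (by simp [h])
      by_cases hlt : c < key x
      · have h2 : ∀ y ∈ (c :: t).flatMap F, (fun a b => decide (key b < key a)) x y = true := by
          intro y hy
          rcases List.mem_flatMap.mp hy with ⟨c', hc', hyc'⟩
          have : c' = c ∨ c' ∈ t := by simpa using hc'
          rcases this with rfl | hmem
          · simp [hF c' y hyc', hlt]
          · have := hgt c' hmem; simp [hF c' y hyc']; omega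
        rw [pvInsertBy_all_before _ _ _ h2]
        have hins : PySem.List.insertBy (fun a b => decide ((b : Int) < a)) (key x) (c :: t)
            = key x :: c :: t := by simp [PySem.List.insertBy, hlt]
        rw [hins]
        have h3 : (c :: t).flatMap (fun c' => F c' ++ if key x == c' then [x] else []) =
            (c :: t).flatMap F := by
          apply pvFlatMap_congr; intro c' hc'
          have : c' = c ∨ c' ∈ t := by simpa using hc'
          have hne' : key x ≠ c' := by
            rcases this with rfl | hmem
            · exact hne
            · intro h; exact hk (by simp [h, hmem])
          simp [hne']
        conv_rhs => rw [List.flatMap_cons, h3]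
        simp [hFx, List.flatMap_cons]
      · have hxc : key x < c := by omega
        have h1 : ∀ y ∈ F c, (fun a b => decide (key b < key a)) x y = false := by
          intro y hy; simp [hF c y hy]; omega
        have hkt : key x ∉ t := fun h => hk (by simp [h])
        rw [List.flatMap_cons, pvInsertBy_append_not_before _ _ _ _ h1, ih ht hkt]
        have hins : PySem.List.insertBy (fun a b => decide ((b : Int) < a)) (key x) (c :: t)
            = c :: PySem.List.insertBy (fun a b => decide ((b : Int) < a)) (key x) t := by
          have : ¬ (c < key x) := hlt
          simp [PySem.List.insertBy, this]
        rw [hins, List.flatMap_cons]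
        simp [hne]

theorem pvDedup_append_singleton {α : Type} [BEq α] [LawfulBEq α] (l : List α) (a : α) :
    PySem.List.dedup (l ++ [a]) =
      if a ∈ l then PySem.List.dedup l else PySem.List.dedup l ++ [a] := by
  rw [PySem.List.dedup_eq_ofList, PySem.List.dedup_eq_ofList, PySem.Set.ofList_append_singleton]
  split_ifs with hm
  · exact PySem.Set.add_of_mem (by rw [PySem.Set.mem_ofList]; exact hm)
  · exact PySem.Set.add_of_not_mem (by rw [PySem.Set.mem_ofList]; exact hm)

-- The sorted-descending distinct-key list is strictly decreasing.
theorem pvSortedKeys_strict (K0 : List Int) (h : K0.Nodup) :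
    (PySem.List.sorted K0 (fun k => k) true).Pairwise (· > ·) := by
  have h1 := PySem.List.sorted_pairwise_rev K0 (fun k => k)
  have h2 : (PySem.List.sorted K0 (fun k => k) true).Nodup :=
    ((PySem.List.sorted_perm K0 (fun k => k) true).nodup_iff).mpr h
  have := h1.and h2
  exact this.imp (by intro a b hab; rcases hab with ⟨hle, hne⟩; omega)

-- Core: Python's stable descending sort by an Int key is bucket concatenation over
-- the descending-sorted distinct keys.
theorem pvSorted_rev_buckets {α : Type} (xs : List α) (key : α → Int) :
    PySem.List.sorted xs key true =
      (PySem.List.sorted (PySem.List.dedup (xs.map key)) (fun k => k) true).flatMap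
        (fun c => xs.filter (fun s => key s == c)) := by
  induction xs using List.reverseRecOn with
  | nil => rfl
  | append_singleton xs x ih =>
      have hL : PySem.List.sorted (xs ++ [x]) key true
          = PySem.List.insertBy (fun a b => decide (key b < key a)) x
              (PySem.List.sorted xs key true) := by
        rw [PySem.List.sorted_rev_eq_foldl_insertBy, List.foldl_append,
          ← PySem.List.sorted_rev_eq_foldl_insertBy, List.foldl_cons, List.foldl_nil]
      rw [hL, ih]
      have hdec := pvSortedKeys_strict (PySem.List.dedup (xs.map key))
        (PySem.List.nodup_dedup _)
      have hF : ∀ c : Int, ∀ y ∈ xs.filter (fun s => key s == c), key y = c := by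
        intro c y hy
        have := (List.mem_filter.mp hy).2
        simpa using this
      have hfly : ∀ c : Int, (xs ++ [x]).filter (fun s => key s == c)
          = xs.filter (fun s => key s == c) ++ if key x == c then [x] else [] := by
        intro c
        rw [List.filter_append]
        simp [List.filter_cons]
      by_cases hmem : key x ∈ xs.map key
      · have hdd : PySem.List.dedup ((xs ++ [x]).map key) = PySem.List.dedup (xs.map key) := by
          simp only [List.map_append, List.map_cons, List.map_nil]
          rw [pvDedup_append_singleton]
          simp [hmem]
        rw [hdd]
        rw [pvInsert_flatMap_mem key x _ _ hdec hF
          (by rw [PySem.List.mem_sorted, PySem.List.mem_dedup]; exact hmem)]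
        apply pvFlatMap_congr
        intro c hc
        exact (hfly c).symm
      · have hdd : PySem.List.dedup ((xs ++ [x]).map key)
            = PySem.List.dedup (xs.map key) ++ [key x] := by
          simp only [List.map_append, List.map_cons, List.map_nil]
          rw [pvDedup_append_singleton]
          simp [hmem]
        rw [hdd]
        have hKs : PySem.List.sorted (PySem.List.dedup (xs.map key) ++ [key x]) (fun k => k) true
            = PySem.List.insertBy (fun a b => decide ((b : Int) < a)) (key x)
                (PySem.List.sorted (PySem.List.dedup (xs.map key)) (fun k => k) true) := by
          rw [PySem.List.sorted_rev_eq_foldl_insertBy, List.foldl_append,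
            ← PySem.List.sorted_rev_eq_foldl_insertBy, List.foldl_cons, List.foldl_nil]
        rw [hKs]
        rw [pvInsert_flatMap_new key x _ _ hdec hF
          (by rw [PySem.List.mem_sorted, PySem.List.mem_dedup]; exact hmem)
          (by
            apply List.filter_eq_nil_iff.mpr
            intro y hy
            simp only [beq_iff_eq]
            intro h
            exact hmem (List.mem_map.mpr ⟨y, hy, h⟩))]
        apply pvFlatMap_congr
        intro c hc
        exact (hfly c).symm

theorem pvFoldl_pair (SS : List String) (d : PySem.Dict Int (List String)) :
    SS.foldl (fun d s => d.modify (PySem.Str.len s) [] (fun b => b ++ [s])) d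
      = (SS.map (fun s => (PySem.Str.len s, s))).foldl
          (fun d p => d.modify p.1 [] (fun b => b ++ [p.2])) d := by
  rw [List.foldl_map]

theorem pvMain (phrase : String) :
    generate_permutations phrase = generate_permutations_alt phrase := by
  simp only [generate_permutations, generate_permutations_alt, pvCombos_eq]
  set words := PySem.Str.split₀ phrase with hwords
  set R := PySem.List.pyRange 1 ((words.length : Int) + 1) 1 with hR
  set SS := R.flatMap (fun length => (PySem.List.combinations words length.toNat).map
    (fun combo => PySem.Str.join " " combo)) with hSS
  have hB : R.foldl (fun d k => (PySem.List.combinations words k.toNat).foldl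
        (fun d combo => d.modify (PySem.Str.len (PySem.Str.join " " combo)) []
          (fun b => b ++ [PySem.Str.join " " combo])) d) PySem.Dict.empty
      = SS.foldl (fun d s => d.modify (PySem.Str.len s) [] (fun b => b ++ [s]))
          PySem.Dict.empty := by
    rw [hSS, pvFoldl_flatMap]
    congr 1
    funext d k
    rw [List.foldl_map]
  rw [hB]
  set B := SS.foldl (fun d s => d.modify (PySem.Str.len s) [] (fun b => b ++ [s]))
    PySem.Dict.empty with hBdef
  have hkeys : B.keys = PySem.List.dedup (SS.map (fun s => PySem.Str.len s)) := by
    rw [hBdef, PySem.Dict.keys_foldl_modify_key SS (fun s => PySem.Str.len s)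
      ([] : List String) (fun _ s => fun b => b ++ [s]) PySem.Dict.empty]
    rw [PySem.Dict.keys_empty, PySem.Set.update_nil_left, ← PySem.List.dedup_eq_ofList]
  have hgetD : ∀ c : Int, B.getD c [] = SS.filter (fun s => PySem.Str.len s == c) := by
    intro c
    rw [hBdef, pvFoldl_pair, PySem.Dict.getD_foldl_modify_append, PySem.Dict.getD_empty,
      List.nil_append, List.filter_map]
    simp [Function.comp_def]
  rw [hkeys]
  have hout : (fun (out : List String) (key : Int) => out ++ B.getD key [])
      = (fun out key => out ++ SS.filter (fun s => PySem.Str.len s == key)) := by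
    funext out key
    rw [hgetD]
  rw [hout, PySem.List.foldl_append_eq_flatMap, List.nil_append]
  exact pvSorted_rev_buckets SS (fun s => PySem.Str.len s)

-- ===== VERDICT (by name: the statement is the Claim_ definition above) =====
theorem generate_permutations_spec : Claim_equal_generate_permutations := by
  intro phrase _
  unfold Spec_generate_permutations
  exact pvMain phrase
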